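-- pv_equiv track=rewrite | github.com/Brian01Chen/PyLearn | tools/diff_sort.py | row_best_match
-- ===== SOURCE A (Python) =====
-- def row_best_match(a,b,alo,ahi,blo,bhi):
--     besti, bestj, bestsize = alo, blo, 0
--
--     b2j = {}
--     for i, elt in enumerate(b):
--             indices = b2j.setdefault(elt, [])
--             indices.append(i)
--     j2len = {}
--     nothing = []
--     for i in range(alo, ahi):
--             # look at all instances of a[i] in b; note that because
--             j2lenget = j2len.get                            # j2lenget 字典记录历史数据
--             newj2len = {}                                   # newj2len 每次都初始化
--             for j in b2j.get(a[i], nothing):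
--                 # a[i] matches b[j]
--                 if j < blo:
--                     continue
--                 if j >= bhi:
--                     break
--                 k = newj2len[j] = j2lenget(j-1, 0) + 1      # j2lenget(j-1) 记录了上次 k-1
--                 if k > bestsize :                           # k>= 可以就远匹配
--                     besti, bestj, bestsize = i-k+1, j-k+1, k
--             #print ('besti, bestj, bestsize: ' , besti, bestj, bestsize)
--             j2len = newj2len
--
--     return besti, bestj, bestsize
-- ===== SOURCE B (Python) =====
-- def row_best_match(a, b, alo, ahi, blo, bhi):
--     besti, bestj, bestsize = alo, blo, 0
--     lo = max(blo, 0)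
--     hi = min(bhi, len(b))
--     prev = {}
--     for i in range(alo, ahi):
--         ai = a[i]
--         cur = {}
--         for j in range(lo, hi):
--             if b[j] == ai:
--                 k = prev.get(j - 1, 0) + 1
--                 cur[j] = k
--                 if k > bestsize:
--                     besti, bestj, bestsize = i - k + 1, j - k + 1, k
--         prev = cur
--     return besti, bestj, bestsize
-- ===== Notes on version B (the rewrite author's own statement) =====
-- stated objective: simpler
-- what changed: Replaces difflib's b2j position-index dict and per-element sparse position-list scan by a classic dense longest-common-substring rolling-row DP over j in [max(blo,0), min(bhi,len(b))).
import Mathlib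
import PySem

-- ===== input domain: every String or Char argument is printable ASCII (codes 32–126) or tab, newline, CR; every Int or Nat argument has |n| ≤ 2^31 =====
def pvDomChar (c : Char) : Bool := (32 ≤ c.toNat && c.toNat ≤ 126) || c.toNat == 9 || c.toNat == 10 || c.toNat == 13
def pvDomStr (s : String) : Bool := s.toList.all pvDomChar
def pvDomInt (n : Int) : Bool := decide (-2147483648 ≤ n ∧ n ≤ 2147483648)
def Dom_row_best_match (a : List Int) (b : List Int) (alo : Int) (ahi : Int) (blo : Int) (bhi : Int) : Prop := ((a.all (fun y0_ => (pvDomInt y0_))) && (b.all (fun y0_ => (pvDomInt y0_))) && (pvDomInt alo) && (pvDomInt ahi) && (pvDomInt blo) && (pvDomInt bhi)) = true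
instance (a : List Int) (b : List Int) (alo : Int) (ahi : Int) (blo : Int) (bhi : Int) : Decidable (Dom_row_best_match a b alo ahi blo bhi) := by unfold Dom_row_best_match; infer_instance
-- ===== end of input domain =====

-- B replaces A's b2j index / sparse position lists by a classic dense longest-common-substring
-- rolling-row DP over j in [max(blo,0), min(bhi,len(b))) — simpler, no index dict to build.

-- ===== PORT A =====
-- inner 'for j in b2j.get(a[i], nothing)' loop, with its 'continue'/'break'
def rbmInnerA (i blo bhi : Int) (j2len : PySem.Dict Int Int) :
    List Int → (Int × Int × Int) × PySem.Dict Int Int → (Int × Int × Int) × PySem.Dict Int Int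
  | [], st => st
  | j :: rest, st =>
    if j < blo then rbmInnerA i blo bhi j2len rest st
    else if bhi ≤ j then st
    else
      let k := j2len.getD (j - 1) 0 + 1
      rbmInnerA i blo bhi j2len rest
        ((if k > st.1.2.2 then (i - k + 1, j - k + 1, k) else st.1), st.2.insert j k)

def row_best_match (a : List Int) (b : List Int) (alo : Int) (ahi : Int) (blo : Int) (bhi : Int) : Int × Int × Int :=
  -- b2j: for i, elt in enumerate(b): b2j.setdefault(elt, []).append(i)
  let b2j := (PySem.List.enumerate b 0).foldl
    (fun d p => d.modify p.2 [] (fun l => l ++ [p.1])) PySem.Dict.empty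
  -- outer loop state: ((besti, bestj, bestsize), j2len); a[i] as pyGetD (Pre_ excludes the IndexError)
  ((PySem.List.pyRange alo ahi 1).foldl
    (fun st i =>
      rbmInnerA i blo bhi st.2 (b2j.getD (PySem.List.pyGetD a i 0) []) (st.1, PySem.Dict.empty))
    ((alo, blo, 0), PySem.Dict.empty)).1

-- ===== PORT B =====
def row_best_match_alt (a : List Int) (b : List Int) (alo : Int) (ahi : Int) (blo : Int) (bhi : Int) : Int × Int × Int :=
  let lo := max blo 0
  let hi := min bhi (b.length : Int)
  ((PySem.List.pyRange alo ahi 1).foldl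
    (fun st i =>
      let ai := PySem.List.pyGetD a i 0
      (PySem.List.pyRange lo hi 1).foldl
        (fun (st2 : (Int × Int × Int) × PySem.Dict Int Int) j =>
          if PySem.List.pyGetD b j 0 == ai then
            let k := st.2.getD (j - 1) 0 + 1
            ((if k > st2.1.2.2 then (i - k + 1, j - k + 1, k) else st2.1), st2.2.insert j k)
          else st2)
        (st.1, PySem.Dict.empty))
    ((alo, blo, 0), PySem.Dict.empty)).1

-- ===== PRECONDITION & SPEC =====
-- Pre_ excludes exactly the inputs where Python's a[i] raises IndexError for some i in range(alo, ahi)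
def Pre_row_best_match (a : List Int) (b : List Int) (alo : Int) (ahi : Int) (blo : Int) (bhi : Int) : Prop :=
  alo < ahi → (-(a.length : Int) ≤ alo ∧ ahi ≤ (a.length : Int))
instance (a : List Int) (b : List Int) (alo : Int) (ahi : Int) (blo : Int) (bhi : Int) : Decidable (Pre_row_best_match a b alo ahi blo bhi) := by unfold Pre_row_best_match; infer_instance
def pvWitness_row_best_match : List Int × List Int × Int × Int × Int × Int := ([1, 2, 3], [2, 3], 0, 3, 0, 2)

def Spec_row_best_match (a : List Int) (b : List Int) (alo : Int) (ahi : Int) (blo : Int) (bhi : Int) (out : Int × Int × Int) : Prop := out = row_best_match_alt a b alo ahi blo bhi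
instance (a : List Int) (b : List Int) (alo : Int) (ahi : Int) (blo : Int) (bhi : Int) (out : Int × Int × Int) : Decidable (Spec_row_best_match a b alo ahi blo bhi out) := by unfold Spec_row_best_match; infer_instance

-- ===== CLAIM (what is proved, stated in full; the proofs are below) =====
def Claim_equal_row_best_match : Prop := ∀ (a : List Int) (b : List Int) (alo : Int) (ahi : Int) (blo : Int) (bhi : Int), Dom_row_best_match a b alo ahi blo bhi → Pre_row_best_match a b alo ahi blo bhi → Spec_row_best_match a b alo ahi blo bhi (row_best_match a b alo ahi blo bhi)

-- ===== LEMMAS AND PROOFS =====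

-- the common inner step (proof-side name for the identical match step of both inner loops)
def rbmG (i : Int) (prev : PySem.Dict Int Int)
    (st : (Int × Int × Int) × PySem.Dict Int Int) (j : Int) :
    (Int × Int × Int) × PySem.Dict Int Int :=
  let k := prev.getD (j - 1) 0 + 1
  ((if k > st.1.2.2 then (i - k + 1, j - k + 1, k) else st.1), st.2.insert j k)

-- A's inner loop over an ascending list = a fold over the [blo, bhi) filtered list
theorem rbmInnerA_eq_foldl (i blo bhi : Int) (prev : PySem.Dict Int Int) :
    ∀ (L : List Int), L.Pairwise (· < ·) → ∀ st,
      rbmInnerA i blo bhi prev L st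
        = (L.filter (fun j => decide (blo ≤ j) && decide (j < bhi))).foldl (rbmG i prev) st := by
  intro L
  induction L with
  | nil => intro _ st; rfl
  | cons j rest ih =>
    intro hp st
    rw [List.pairwise_cons] at hp
    by_cases h1 : j < blo
    · have hb : decide (blo ≤ j) = false := by simp; omega
      simp only [rbmInnerA, if_pos h1, List.filter_cons, hb, Bool.false_and,
        Bool.false_eq_true, ite_false]
      exact ih hp.2 st
    · by_cases h2 : bhi ≤ j
      · have hb : decide (j < bhi) = false := by simp; omega
        have hrest : rest.filter (fun j => decide (blo ≤ j) && decide (j < bhi)) = [] := by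
          refine List.filter_eq_nil_iff.mpr (fun x hx => ?_)
          have := hp.1 x hx
          simp; omega
        simp only [rbmInnerA, if_neg h1, if_pos h2, List.filter_cons, hb, Bool.and_false,
          Bool.false_eq_true, ite_false, hrest, List.foldl_nil]
      · have hb : (decide (blo ≤ j) && decide (j < bhi)) = true := by simp; omega
        simp only [rbmInnerA, if_neg h1, if_neg h2, List.filter_cons, hb, ite_true,
          List.foldl_cons]
        exact ih hp.2 _

-- every pair in enumerate(b) reads back through pyGetD
theorem pyGetD_of_mem_enumerate_aux (b : List Int) :
    ∀ (n s : Nat), s + n = b.length →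
      ∀ p ∈ PySem.List.enumerate (b.drop s) (s : Int), PySem.List.pyGetD b p.1 0 = p.2 := by
  intro n
  induction n with
  | zero =>
    intro s hs p hp
    rw [List.drop_of_length_le (by omega)] at hp
    simp [PySem.List.enumerate] at hp
  | succ n ih =>
    intro s hs p hp
    have hlt : s < b.length := by omega
    rw [List.drop_eq_getElem_cons hlt, PySem.List.enumerate_cons] at hp
    rcases List.mem_cons.mp hp with h | h
    · subst h
      simp [PySem.List.pyGetD_natCast, List.getD_eq_getElem?_getD, List.getElem?_eq_getElem hlt]
    · have : ((s : Int) + 1) = ((s + 1 : Nat) : Int) := by push_cast; ring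
      rw [this] at h
      exact ih (s + 1) (by omega) p h

theorem pyGetD_of_mem_enumerate (b : List Int) :
    ∀ p ∈ PySem.List.enumerate b 0, PySem.List.pyGetD b p.1 0 = p.2 := by
  have := pyGetD_of_mem_enumerate_aux b b.length 0 (by omega)
  simpa using this

-- A's b2j lookup is the ascending list of matching positions, as a filtered range
theorem b2j_getD_eq (b : List Int) (x : Int) :
    ((PySem.List.enumerate b 0).foldl
        (fun d p => d.modify p.2 [] (fun l => l ++ [p.1])) PySem.Dict.empty).getD x []
      = (PySem.List.pyRange 0 (b.length : Int) 1).filter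
          (fun j => PySem.List.pyGetD b j 0 == x) := by
  have h0 : (PySem.List.enumerate b 0).foldl
        (fun d p => d.modify p.2 [] (fun l => l ++ [p.1])) PySem.Dict.empty
      = ((PySem.List.enumerate b 0).map Prod.swap).foldl
        (fun d p => d.modify p.1 [] (fun l => l ++ [p.2])) PySem.Dict.empty := by
    rw [List.foldl_map]
    rfl
  rw [h0, PySem.Dict.getD_foldl_modify_append, List.filter_map, List.map_map]
  have h1 : ∀ p ∈ PySem.List.enumerate b 0,
      ((fun q => q.1 == x) ∘ Prod.swap) p = (fun (q : Int × Int) => PySem.List.pyGetD b q.1 0 == x) p := by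
    intro p hp
    simp [Prod.swap, pyGetD_of_mem_enumerate b p hp]
  rw [List.filter_congr h1]
  have h2 : (fun (q : Int × Int) => q.2) ∘ Prod.swap = (fun (q : Int × Int) => q.1) := by
    funext q; rfl
  rw [h2]
  have h3 : (PySem.List.pyRange 0 (b.length : Int) 1)
      = List.map (fun (q : Int × Int) => q.1) (PySem.List.enumerate b 0) := by
    rw [PySem.List.map_fst_enumerate]; norm_num
  rw [h3, List.filter_map]
  simp only [PySem.Dict.getD_empty, List.nil_append]
  rfl

-- clamping an interval filter on a range
theorem filter_range_clamp (q : Int → Bool) (lo hi v : Int) :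
    ∀ (n : Nat) (u : Int), (v - u).toNat ≤ n →
      (PySem.List.pyRange u v 1).filter (fun j => (decide (lo ≤ j) && decide (j < hi)) && q j)
        = (PySem.List.pyRange (max u lo) (min v hi) 1).filter q := by
  intro n
  induction n with
  | zero =>
    intro u hu
    rw [PySem.List.pyRange_one_eq_nil (by omega), PySem.List.pyRange_one_eq_nil (by omega)]
    simp
  | succ n ih =>
    intro u hu
    by_cases hv : v ≤ u
    · rw [PySem.List.pyRange_one_eq_nil hv, PySem.List.pyRange_one_eq_nil (by omega)]
      simp
    · have hv' : u < v := by omega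
      rw [PySem.List.pyRange_one_cons hv', List.filter_cons]
      by_cases hin : lo ≤ u ∧ u < hi
      · have hcond : (decide (lo ≤ u) && decide (u < hi)) = true := by simp; omega
        have hmax : max u lo = u := by omega
        have hmax' : max (u + 1) lo = u + 1 := by omega
        have hmin : u < min v hi := by omega
        rw [hmax, PySem.List.pyRange_one_cons hmin, List.filter_cons, ih (u + 1) (by omega), hmax']
        simp [hcond]
      · have hcond : ((decide (lo ≤ u) && decide (u < hi)) && q u) = false := by
          simp; omega
        rw [hcond, if_neg (by simp), ih (u + 1) (by omega)]
        by_cases hlo : u < lo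
        · have : max u lo = max (u + 1) lo := by omega
          rw [this]
        · have hhi : hi ≤ u := by omega
          rw [PySem.List.pyRange_one_eq_nil (by omega), PySem.List.pyRange_one_eq_nil (by omega)]

-- the two outer-loop steps agree on every state
theorem step_eq (b : List Int) (blo bhi : Int)
    (st : (Int × Int × Int) × PySem.Dict Int Int) (i : Int) (ai : Int) :
    rbmInnerA i blo bhi st.2
        (((PySem.List.enumerate b 0).foldl
            (fun d p => d.modify p.2 [] (fun l => l ++ [p.1])) PySem.Dict.empty).getD ai [])
        (st.1, PySem.Dict.empty)
      = (PySem.List.pyRange (max blo 0) (min bhi (b.length : Int)) 1).foldl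
          (fun (st2 : (Int × Int × Int) × PySem.Dict Int Int) j =>
            if PySem.List.pyGetD b j 0 == ai then
              let k := st.2.getD (j - 1) 0 + 1
              ((if k > st2.1.2.2 then (i - k + 1, j - k + 1, k) else st2.1), st2.2.insert j k)
            else st2)
          (st.1, PySem.Dict.empty) := by
  rw [b2j_getD_eq b ai]
  rw [rbmInnerA_eq_foldl i blo bhi st.2 _
    (List.Pairwise.filter _ (PySem.List.pairwise_lt_pyRange_one 0 (b.length : Int)))]
  rw [List.filter_filter]
  rw [filter_range_clamp (fun j => PySem.List.pyGetD b j 0 == ai) blo bhi (b.length : Int)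
    ((b.length : Int) - 0).toNat 0 (by omega)]
  rw [max_comm (0 : Int) blo, min_comm ((b.length : Int)) bhi]
  rw [List.foldl_filter]
  apply PySem.List.foldl_congr_mem
  intro st2 j _
  by_cases h : PySem.List.pyGetD b j 0 == ai <;> simp [h, rbmG]

-- ===== VERDICT (by name: the statement is the Claim_ definition above) =====
theorem row_best_match_spec : Claim_equal_row_best_match := by
  unfold Claim_equal_row_best_match Spec_row_best_match
  intro a b alo ahi blo bhi _ _
  show row_best_match a b alo ahi blo bhi = row_best_match_alt a b alo ahi blo bhi
  unfold row_best_match row_best_match_alt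
  exact congrArg Prod.fst (PySem.List.foldl_congr_mem _ _ _ _
    (fun st i _ => step_eq b blo bhi st i (PySem.List.pyGetD a i 0)))
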